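-- pv_equiv track=rewrite | github.com/RamyPoe/PythonRAT | admin/admin.py | subDir
-- ===== SOURCE A (Python) =====
-- def subDir(path):
--     path = path.split('\\')
--     del path[-1]
--     finalString = ''
--     first = True
--     for item in path:
--         if first:
--             first = not first
--         else:
--             finalString += '\\'
--         finalString += item
--     return finalString
-- ===== SOURCE B (Python) =====
-- def subDir(path):
--     # Prefix of path before the last backslash ('' if there is none):
--     # locate the last separator and slice, instead of split/del/rejoin.
--     return path.rpartition('\\')[0]
-- ===== Notes on version B (the rewrite author's own statement) =====
-- stated objective: simpler
-- what changed: A tokenizes the whole string on backslashes into a list, deletes the last element and rejoins the rest in a forward accumulation loop; B never builds a list: it locates the last backslash (rpartition) and returns the prefix before it in one slice.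
import Mathlib
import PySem

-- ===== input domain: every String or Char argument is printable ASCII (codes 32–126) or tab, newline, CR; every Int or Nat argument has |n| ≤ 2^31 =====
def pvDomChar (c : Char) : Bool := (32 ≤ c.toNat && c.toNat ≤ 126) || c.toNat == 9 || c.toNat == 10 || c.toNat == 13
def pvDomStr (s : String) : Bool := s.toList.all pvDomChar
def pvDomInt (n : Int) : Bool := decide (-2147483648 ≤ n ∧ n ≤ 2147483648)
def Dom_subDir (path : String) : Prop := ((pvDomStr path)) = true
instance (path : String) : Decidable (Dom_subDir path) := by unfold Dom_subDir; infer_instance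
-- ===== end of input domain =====

-- B replaces A's split / delete-last / rejoin loop by one scan for the last backslash and a slice (objective: simpler).

-- ===== PORT A =====
-- the loop body: 'if first: first = not first; else: finalString += "\\"; finalString += item'
def subDirStep (st : List Char × Bool) (item : List Char) : List Char × Bool :=
  if st.2 then (st.1 ++ item, !st.2) else (st.1 ++ ['\\'] ++ item, st.2)

def subDir (path : String) : String :=
  -- path = path.split('\\')  (nonempty separator: Chars.splitOn is exact)
  let parts := PySem.Chars.splitOn path.toList ['\\']
  -- del path[-1]  (split never returns an empty list, so deleting the last element is exact)
  let parts := parts.dropLast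
  -- for item in path: …  accumulating finalString with the 'first' flag
  String.mk (parts.foldl subDirStep ([], true)).1

-- ===== PORT B =====
def subDir_alt (path : String) : String :=
  -- path.rpartition('\\')[0]: the index of the LAST backslash (rfind), then the prefix slice
  -- before it; '' when there is no backslash — exactly CPython's rpartition, first component.
  let i := PySem.Chars.rfind path.toList ['\\']
  if i < 0 then "" else String.mk (PySem.Chars.slice path.toList none (some i))

-- ===== PRECONDITION & SPEC =====
def Spec_subDir (path : String) (out : String) : Prop := out = subDir_alt path
instance (path : String) (out : String) : Decidable (Spec_subDir path out) := by unfold Spec_subDir; infer_instance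

-- ===== CLAIM (what is proved, stated in full; the proofs are below) =====
def Claim_equal_subDir : Prop := ∀ (path : String), Dom_subDir path → Spec_subDir path (subDir path)

-- ===== LEMMAS AND PROOFS =====

-- ===== LEMMAS AND PROOFS =====
set_option maxHeartbeats 1000000

-- reference single-char split (head recursion), used only in the proofs
def sp : List Char → List (List Char)
  | [] => [[]]
  | c :: rest => if c = '\\' then [] :: sp rest else (sp rest).modifyHead (c :: ·)

theorem sp_ne_nil (l : List Char) : sp l ≠ [] := by
  induction l with
  | nil => simp [sp]
  | cons c rest ih =>
    simp only [sp]
    split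
    · simp
    · cases h : sp rest with
      | nil => exact absurd h ih
      | cons a t => simp

theorem go_eq_sp (fuel : Nat) (l cur : List Char) (accs : List (List Char))
    (h : l.length ≤ fuel) :
    PySem.Chars.splitOn.go ['\\'] fuel l cur accs
      = accs.reverse ++ (sp l).modifyHead (cur.reverse ++ ·) := by
  induction fuel generalizing l cur accs with
  | zero =>
    have hl : l = [] := List.eq_nil_of_length_eq_zero (Nat.le_zero.mp h)
    subst hl
    simp [PySem.Chars.splitOn.go, sp]
  | succ fuel ih =>
    cases l with
    | nil => simp [PySem.Chars.splitOn.go, sp]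
    | cons c rest =>
      by_cases hc : c = '\\'
      · subst hc
        have hpre : (['\\'] : List Char).isPrefixOf ('\\' :: rest) = true := by
          simp [List.isPrefixOf]
        simp only [PySem.Chars.splitOn.go, hpre, if_true, List.drop_succ_cons, List.drop_zero,
          List.length_singleton]
        rw [ih rest [] (cur.reverse :: accs) (by simpa using h)]
        cases hsp : sp rest with
        | nil => exact absurd hsp (sp_ne_nil rest)
        | cons a t => simp [sp, hsp]
      · have hpre : (['\\'] : List Char).isPrefixOf (c :: rest) = false := by
          simp [List.isPrefixOf]
          intro hcc; exact absurd hcc.symm hc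
        simp only [PySem.Chars.splitOn.go, hpre, Bool.false_eq_true, if_false]
        rw [ih rest (c :: cur) accs (by simpa using h)]
        cases hsp : sp rest with
        | nil => exact absurd hsp (sp_ne_nil rest)
        | cons a t => simp [sp, hsp, hc, List.modifyHead]

theorem splitOn_eq_sp (s : List Char) : PySem.Chars.splitOn s ['\\'] = sp s := by
  rw [PySem.Chars.splitOn, go_eq_sp (s.length + 1) s [] [] (by omega)]
  cases hsp : sp s with
  | nil => exact absurd hsp (sp_ne_nil s)
  | cons a t => simp

theorem foldl_false (l : List (List Char)) (acc : List Char) :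
    (l.foldl subDirStep (acc, false)).1 = acc ++ l.flatMap (fun p => '\\' :: p) := by
  induction l generalizing acc with
  | nil => simp
  | cons h t ih => simp [subDirStep, ih]

theorem join_eq_flatMap (h : List Char) (t : List (List Char)) :
    PySem.Chars.join ['\\'] (h :: t) = h ++ t.flatMap (fun p => '\\' :: p) := by
  induction t generalizing h with
  | nil => simp [PySem.Chars.join_singleton]
  | cons b t' ih => simp [PySem.Chars.join_cons_cons, ih]

theorem foldl_join (parts : List (List Char)) :
    (parts.foldl subDirStep ([], true)).1 = PySem.Chars.join ['\\'] parts := by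
  cases parts with
  | nil => simp [PySem.Chars.join_nil]
  | cons h t =>
    simp only [List.foldl_cons, subDirStep, if_true]
    rw [show ((([] : List Char) ++ h, !true)) = ((h, false)) by simp]
    rw [foldl_false, join_eq_flatMap]

theorem J1 (s : List Char) : PySem.Chars.join ['\\'] (sp s) = s := by
  induction s with
  | nil => simp [sp, PySem.Chars.join_singleton]
  | cons c rest ih =>
    cases hsp : sp rest with
    | nil => exact absurd hsp (sp_ne_nil rest)
    | cons a t =>
      rw [hsp] at ih
      by_cases hc : c = '\\'
      · subst hc
        simp [sp, hsp, PySem.Chars.join_cons_cons, ih]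
      · simp only [sp, hc, if_false, hsp, List.modifyHead]
        cases t with
        | nil =>
          simp only [PySem.Chars.join_singleton] at ih ⊢
          simp [ih]
        | cons b t' =>
          simp only [PySem.Chars.join_cons_cons] at ih ⊢
          simp [ih]

theorem rfind_go_le (s : List Char) (n : Nat) : PySem.Chars.rfind.go s ['\\'] n ≤ (n : Int) := by
  induction n with
  | zero => rw [PySem.Chars.rfind.go]; split <;> simp
  | succ j ih =>
    rw [PySem.Chars.rfind.go]
    split
    · simp
    · exact le_trans ih (by push_cast; omega)

theorem rfind_go_congr (n : Nat) (s t : List Char)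
    (h : ∀ j ≤ n, ((['\\'] : List Char).isPrefixOf (s.drop j)) = ((['\\'] : List Char).isPrefixOf (t.drop j))) :
    PySem.Chars.rfind.go s ['\\'] n = PySem.Chars.rfind.go t ['\\'] n := by
  induction n with
  | zero =>
    rw [PySem.Chars.rfind.go, PySem.Chars.rfind.go]
    have h0 := h 0 (le_refl 0)
    simp only [List.drop_zero] at h0
    rw [h0]
  | succ j ih =>
    rw [PySem.Chars.rfind.go, PySem.Chars.rfind.go]
    rw [h (j + 1) (le_refl _)]
    rw [ih (fun k hk => h k (le_trans hk (Nat.le_succ j)))]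

theorem R1 (s : List Char) : PySem.Chars.rfind (s ++ ['\\']) ['\\'] = (s.length : Int) := by
  rw [PySem.Chars.rfind]
  simp only [List.length_append, List.length_singleton]
  rw [PySem.Chars.rfind.go]
  have hdrop : (s ++ ['\\']).drop (s.length + 1) = [] := by simp
  have hpre : (['\\'] : List Char).isPrefixOf ((s ++ ['\\']).drop (s.length + 1)) = false := by
    rw [hdrop]; simp [List.isPrefixOf]
  rw [hpre]
  simp only [Bool.false_eq_true, if_false]
  cases hn : s.length with
  | zero =>
    have hs : s = [] := List.eq_nil_of_length_eq_zero hn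
    subst hs
    rw [PySem.Chars.rfind.go]
    simp [List.isPrefixOf]
  | succ m =>
    rw [PySem.Chars.rfind.go]
    have hd2 : (s ++ ['\\']).drop (m + 1) = ['\\'] := by
      rw [← hn]
      simp
    rw [hd2]
    simp [List.isPrefixOf]

theorem R2 (s : List Char) (x : Char) (hx : x ≠ '\\') :
    PySem.Chars.rfind (s ++ [x]) ['\\'] = PySem.Chars.rfind s ['\\'] := by
  rw [PySem.Chars.rfind, PySem.Chars.rfind]
  simp only [List.length_append, List.length_singleton]
  rw [PySem.Chars.rfind.go]
  have hdrop : (s ++ [x]).drop (s.length + 1) = [] := by simp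
  have hpre : (['\\'] : List Char).isPrefixOf ((s ++ [x]).drop (s.length + 1)) = false := by
    rw [hdrop]; simp [List.isPrefixOf]
  rw [hpre]
  simp only [Bool.false_eq_true, if_false]
  apply rfind_go_congr
  intro j hj
  rcases lt_or_eq_of_le hj with hlt | heq
  · rw [List.drop_append_of_le_length (le_of_lt hlt)]
    cases hdj : s.drop j with
    | nil => exact absurd (List.drop_eq_nil_iff.mp hdj) (Nat.not_le.mpr hlt)
    | cons a u => simp [List.isPrefixOf]
  · subst heq
    rw [List.drop_append_of_le_length (le_refl _)]
    simp [List.isPrefixOf]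
    intro hcc; exact absurd hcc.symm hx

theorem SP1 (s : List Char) : sp (s ++ ['\\']) = sp s ++ [[]] := by
  induction s with
  | nil => simp [sp]
  | cons c rest ih =>
    by_cases hc : c = '\\'
    · subst hc; simp [sp, ih]
    · simp only [List.cons_append, sp, hc, if_false, ih]
      cases hsp : sp rest with
      | nil => exact absurd hsp (sp_ne_nil rest)
      | cons a t => simp

theorem SP2 (s : List Char) (x : Char) (hx : x ≠ '\\') :
    (sp (s ++ [x])).dropLast = (sp s).dropLast := by
  induction s with
  | nil => simp [sp, hx]
  | cons c rest ih =>
    by_cases hc : c = '\\'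
    · subst hc
      simp only [List.cons_append, sp, if_true]
      rw [List.dropLast_cons_of_ne_nil (sp_ne_nil _), List.dropLast_cons_of_ne_nil (sp_ne_nil _), ih]
    · simp only [List.cons_append, sp, hc, if_false]
      cases hsp : sp rest with
      | nil => exact absurd hsp (sp_ne_nil rest)
      | cons a t =>
        cases hsp2 : sp (rest ++ [x]) with
        | nil => exact absurd hsp2 (sp_ne_nil _)
        | cons b u =>
          rw [hsp, hsp2] at ih
          simp only [List.modifyHead]
          cases t with
          | nil =>
            cases u with
            | nil => simp
            | cons v w => simp [List.dropLast_cons₂] at ih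
          | cons t1 t2 =>
            cases u with
            | nil => simp [List.dropLast_cons₂] at ih
            | cons v w =>
              simp only [List.dropLast_cons₂, List.cons.injEq] at ih
              simp [List.dropLast_cons₂, ih.1, ih.2]

theorem core (cs : List Char) :
    PySem.Chars.join ['\\'] ((sp cs).dropLast)
      = (if PySem.Chars.rfind cs ['\\'] < 0 then []
         else PySem.Chars.slice cs none (some (PySem.Chars.rfind cs ['\\']))) := by
  induction cs using List.reverseRecOn with
  | nil =>
    have hr : PySem.Chars.rfind [] ['\\'] = -1 := by
      rw [PySem.Chars.rfind]
      rw [show ([] : List Char).length = 0 by rfl]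
      rw [PySem.Chars.rfind.go]
      simp [List.isPrefixOf]
    rw [hr]
    simp [sp, PySem.Chars.join_nil]
  | append_singleton s x ih =>
    by_cases hx : x = '\\'
    · subst hx
      rw [SP1, R1, List.dropLast_concat, J1]
      rw [if_neg (by omega)]
      rw [PySem.Chars.slice_eq_listSlice, PySem.List.slice_to_natCast]
      rw [List.take_left]
    · rw [SP2 s x hx, R2 s x hx, ih]
      by_cases hneg : PySem.Chars.rfind s ['\\'] < 0
      · simp [hneg]
      · have h0 : 0 ≤ PySem.Chars.rfind s ['\\'] := by omega
        have hle : PySem.Chars.rfind s ['\\'] ≤ (s.length : Int) := by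
          rw [PySem.Chars.rfind]; exact rfind_go_le s s.length
        simp only [hneg, if_false, PySem.Chars.slice_eq_listSlice]
        rw [PySem.List.slice_to _ h0, PySem.List.slice_to _ h0]
        rw [List.take_append_of_le_length (by omega)]

-- ===== VERDICT (by name: the statement is the Claim_ definition above) =====
theorem subDir_spec : Claim_equal_subDir := by
  intro path _
  unfold Spec_subDir subDir subDir_alt
  simp only [splitOn_eq_sp, foldl_join]
  rw [core]
  split
  · rfl
  · rfl
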